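-- pv_equiv track=rewrite | github.com/Vifxtend/FBXASC_patcher | blender/bpy_FBXASC_patch.py | fbxasc_patch
-- ===== SOURCE A (Python) =====
-- FBX_SPECIAL = {
--                 'FBXASC033': '!',
--                 'FBXASC064': '@',
--                 'FBXASC035': '#',
--                 'FBXASC036': '$',
--                 'FBXASC037': '%',
--                 'FBXASC094': '^',
--                 'FBXASC092': '\\',
--                 'FBXASC038': '&',
--                 'FBXASC042': '*',
--                 'FBXASC040': '(',
--                 'FBXASC041': ')',
--                 'FBXASC046': '.',
--                 'FBXASC047': '/',
--                 'FBXASC044': ',',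
--                 'FBXASC124': '|',
--                 'FBXASC034': '"',
--                 'FBXASC058': ':',
--                 'FBXASC059': ';',
--                 'FBXASC093': ']',
--                 'FBXASC091': '[',
--                 'FBXASC043': '+',
--                 'FBXASC061': '=',
--                 'FBXASC045': '-',
--                 'FBXASC060': '<',
--                 'FBXASC062': '>',
--                 'FBXASC032': 'spacebar'
--                }
--
-- def get_fbxasc(string=str):
--     bad_array = []
--
--     for bad_code, symbol in FBX_SPECIAL.items():
--         if bad_code in string:
--             bad_array.append(bad_code)
--
--     return bad_array
--
-- def fbxasc_patch(name:str):
--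
--     bad_size = len(get_fbxasc(name))
--
--     if bad_size > 0:
--         good_name = ''
--
--         bad_codes = get_fbxasc(name)
--         obj_name = name
--
--         for i in range(bad_size):
--
--             good_name = obj_name.replace(bad_codes[i], '_')
--             obj_name = good_name
--
--
--         return obj_name
-- ===== SOURCE B (Python) =====
-- FBX_SPECIAL = {
--                 'FBXASC033': '!',
--                 'FBXASC064': '@',
--                 'FBXASC035': '#',
--                 'FBXASC036': '$',
--                 'FBXASC037': '%',
--                 'FBXASC094': '^',
--                 'FBXASC092': '\\',
--                 'FBXASC038': '&',
--                 'FBXASC042': '*',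
--                 'FBXASC040': '(',
--                 'FBXASC041': ')',
--                 'FBXASC046': '.',
--                 'FBXASC047': '/',
--                 'FBXASC044': ',',
--                 'FBXASC124': '|',
--                 'FBXASC034': '"',
--                 'FBXASC058': ':',
--                 'FBXASC059': ';',
--                 'FBXASC093': ']',
--                 'FBXASC091': '[',
--                 'FBXASC043': '+',
--                 'FBXASC061': '=',
--                 'FBXASC045': '-',
--                 'FBXASC060': '<',
--                 'FBXASC062': '>',
--                 'FBXASC032': 'spacebar'
--                }
--
-- def fbxasc_patch(name: str):
--     # single left-to-right scan: every FBXASC0dd/FBXASC1dd code occurrence becomes '_'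
--     out = []
--     found = False
--     i = 0
--     n = len(name)
--     while i < n:
--         if name[i:i+9] in FBX_SPECIAL:
--             out.append('_')
--             found = True
--             i += 9
--         else:
--             out.append(name[i])
--             i += 1
--     if found:
--         return ''.join(out)
-- ===== Notes on version B (the rewrite author's own statement) =====
-- stated objective: alternative
-- what changed: Replaces A's detect-pass plus up-to-26 chained str.replace scans by a single left-to-right scan that tests the 9-char window at each position against the FBX_SPECIAL key set and emits an underscore or the original character, tracking whether any code was found so that no-match inputs still return None.
import Mathlib
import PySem

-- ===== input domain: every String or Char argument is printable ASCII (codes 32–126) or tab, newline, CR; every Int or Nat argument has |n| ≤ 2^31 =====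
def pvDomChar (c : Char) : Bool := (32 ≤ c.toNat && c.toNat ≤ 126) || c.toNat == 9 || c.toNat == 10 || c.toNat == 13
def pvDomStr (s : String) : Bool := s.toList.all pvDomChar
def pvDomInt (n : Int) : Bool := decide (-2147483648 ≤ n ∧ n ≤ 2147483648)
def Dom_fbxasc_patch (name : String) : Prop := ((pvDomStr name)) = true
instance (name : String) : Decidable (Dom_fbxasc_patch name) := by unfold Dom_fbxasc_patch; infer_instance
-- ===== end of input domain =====

-- B replaces A's detect-pass plus chained per-code .replace scans by one left-to-right window scan; objective: alternative (same result, genuinely different traversal; not claimed faster).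

-- ===== PORT A =====
def FBX_SPECIAL : PySem.Dict String String :=
  PySem.Dict.ofList [("FBXASC033", "!"), ("FBXASC064", "@"), ("FBXASC035", "#"),
    ("FBXASC036", "$"), ("FBXASC037", "%"), ("FBXASC094", "^"), ("FBXASC092", "\\"),
    ("FBXASC038", "&"), ("FBXASC042", "*"), ("FBXASC040", "("), ("FBXASC041", ")"),
    ("FBXASC046", "."), ("FBXASC047", "/"), ("FBXASC044", ","), ("FBXASC124", "|"),
    ("FBXASC034", "\""), ("FBXASC058", ":"), ("FBXASC059", ";"), ("FBXASC093", "]"),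
    ("FBXASC091", "["), ("FBXASC043", "+"), ("FBXASC061", "="), ("FBXASC045", "-"),
    ("FBXASC060", "<"), ("FBXASC062", ">"), ("FBXASC032", "spacebar")]

def get_fbxasc (string : String) : List String :=
  FBX_SPECIAL.items.foldl
    (fun bad_array kv => if PySem.Str.isIn kv.1 string then bad_array ++ [kv.1] else bad_array) []

def fbxasc_patch (name : String) : Option String :=
  let bad_size : Int := PySem.List.len (get_fbxasc name)
  if bad_size > 0 then
    let bad_codes := get_fbxasc name
    some ((PySem.List.pyRange 0 bad_size).foldl
      (fun obj_name i => PySem.Str.replace obj_name (PySem.List.pyGetD bad_codes i "") "_") name)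
  else
    none

-- ===== PORT B =====
-- the while loop of Source B, as recursion on the remaining suffix: (characters emitted, found flag)
def fbxasc_scan : List Char → List Char × Bool
  | [] => ([], false)
  | c :: t =>
    if FBX_SPECIAL.contains (String.ofList (List.take 9 (c :: t))) then
      ('_' :: (fbxasc_scan (List.drop 8 t)).1, true)
    else
      ((c :: (fbxasc_scan t).1), (fbxasc_scan t).2)
termination_by l => l.length
decreasing_by all_goals (simp only [List.length_drop, List.length_cons]; omega)

def fbxasc_patch_alt (name : String) : Option String :=
  let r := fbxasc_scan name.toList
  if r.2 then some (String.ofList r.1) else none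

-- ===== PRECONDITION & SPEC =====
def Spec_fbxasc_patch (name : String) (out : Option String) : Prop := out = fbxasc_patch_alt name
instance (name : String) (out : Option String) : Decidable (Spec_fbxasc_patch name out) := by unfold Spec_fbxasc_patch; infer_instance

-- ===== CLAIM (what is proved, stated in full; the proofs are below) =====
def Claim_equal_fbxasc_patch : Prop := ∀ (name : String), Dom_fbxasc_patch name → Spec_fbxasc_patch name (fbxasc_patch name)

-- ===== LEMMAS AND PROOFS =====

-- the 26 keys of FBX_SPECIAL, as strings and as char lists
def pvKeys : List String :=
  ["FBXASC033", "FBXASC064", "FBXASC035", "FBXASC036", "FBXASC037", "FBXASC094",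
   "FBXASC092", "FBXASC038", "FBXASC042", "FBXASC040", "FBXASC041", "FBXASC046",
   "FBXASC047", "FBXASC044", "FBXASC124", "FBXASC034", "FBXASC058", "FBXASC059",
   "FBXASC093", "FBXASC091", "FBXASC043", "FBXASC061", "FBXASC045", "FBXASC060",
   "FBXASC062", "FBXASC032"]

def pvCodes : List (List Char) := pvKeys.map String.toList

-- clean recursion computing s.replace(pat, '_') for nonempty pat
def pvRep (pat : List Char) : List Char → List Char
  | [] => []
  | c :: t =>
    if pat.isPrefixOf (c :: t) then '_' :: pvRep pat (t.drop (pat.length - 1))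
    else c :: pvRep pat t
termination_by l => l.length
decreasing_by all_goals (simp only [List.length_drop, List.length_cons]; omega)

def pvFold (s : List Char) (L : List (List Char)) : List Char :=
  L.foldl (fun acc p => pvRep p acc) s

-- shape of every key: 9 chars, 'F' only at the front, no '_'
def pvGood (p : List Char) : Bool :=
  p.length == 9 && p.head? == some 'F' && (p.drop 1).all (fun c => c != 'F' && c != '_')

lemma pvCodes_good : ∀ p ∈ pvCodes, pvGood p = true := by decide

lemma pvRep_nil (pat : List Char) : pvRep pat [] = [] := by simp [pvRep]

lemma pvRep_cons (pat c t) : pvRep pat (c :: t) =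
    if pat.isPrefixOf (c :: t) then '_' :: pvRep pat (t.drop (pat.length - 1))
    else c :: pvRep pat t := by
  rw [pvRep]

lemma pvGo_eq (pat : List Char) (hp : pat ≠ []) :
    ∀ fuel l acc, l.length ≤ fuel →
      PySem.Chars.replace.go pat ['_'] fuel l acc = acc.reverse ++ pvRep pat l := by
  intro fuel
  induction fuel with
  | zero =>
    intro l acc h
    have hl : l = [] := List.eq_nil_of_length_eq_zero (by omega)
    subst hl
    rw [PySem.Chars.replace.go]
    simp [pvRep_nil]
  | succ f ih =>
    intro l acc h
    cases l with
    | nil =>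
      rw [PySem.Chars.replace.go]
      · simp [pvRep_nil]
      · omega
    | cons c t =>
      have hpat1 : 1 ≤ pat.length := List.length_pos_iff.mpr hp
      rw [PySem.Chars.replace.go]
      by_cases hpre : pat.isPrefixOf (c :: t) = true
      · simp only [hpre, if_true]
        have hdl : (List.drop pat.length (c :: t)).length ≤ f := by
          simp only [List.length_drop, List.length_cons] at *
          omega
        rw [ih _ _ hdl, pvRep_cons]
        have hdrop : List.drop pat.length (c :: t) = t.drop (pat.length - 1) := by
          obtain ⟨k, hk⟩ : ∃ k, pat.length = k + 1 := ⟨pat.length - 1, by omega⟩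
          simp [hk]
        simp [hpre, hdrop]
      · rw [Bool.not_eq_true] at hpre
        simp only [hpre, Bool.false_eq_true, if_false]
        have hl : t.length ≤ f := by simp only [List.length_cons] at h; omega
        rw [ih _ _ hl, pvRep_cons]
        simp [hpre]

lemma pvReplace_eq (s pat : List Char) (hp : pat ≠ []) :
    PySem.Chars.replace s pat ['_'] = pvRep pat s := by
  rw [PySem.Chars.replace]
  simp only [List.isEmpty_iff, hp, if_false]
  simpa using pvGo_eq pat hp s.length s [] le_rfl

lemma pvRep_cons_ne (pat : List Char) (h : pat.head? = some 'F') (c : Char) (hc : c ≠ 'F')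
    (t : List Char) : pvRep pat (c :: t) = c :: pvRep pat t := by
  cases pat with
  | nil => simp at h
  | cons a q =>
    simp only [List.head?_cons, Option.some.injEq] at h
    subst h
    rw [pvRep_cons]
    simp [List.isPrefixOf, Ne.symm hc]

lemma pvRep_skip (pat : List Char) (h : pat.head? = some 'F') (u t : List Char)
    (hu : ∀ c ∈ u, c ≠ 'F') : pvRep pat (u ++ t) = u ++ pvRep pat t := by
  induction u with
  | nil => simp
  | cons a u ih =>
    simp only [List.cons_append]
    rw [pvRep_cons_ne pat h a (hu a (by simp)) _]
    rw [ih (fun c hc => hu c (by simp [hc]))]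

lemma pvGood_elim (p : List Char) (h : pvGood p = true) :
    p.length = 9 ∧ p.head? = some 'F' ∧ ∀ c ∈ p.drop 1, c ≠ 'F' ∧ c ≠ '_' := by
  simp only [pvGood, Bool.and_eq_true, beq_iff_eq, List.all_eq_true, bne_iff_ne] at h
  exact ⟨h.1.1, h.1.2, fun c hc => h.2 c hc⟩

lemma pvRep_prefix_pres (pat : List Char) (_hpat : pat.head? = some 'F') :
    ∀ t u, (∀ c ∈ u, c ≠ 'F' ∧ c ≠ '_') → u <+: pvRep pat t → u <+: t := by
  intro t
  induction t with
  | nil =>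
    intro u hu h
    rw [pvRep_nil] at h
    rw [List.prefix_nil] at h
    simp [h]
  | cons c t ih =>
    intro u hu h
    rw [pvRep_cons] at h
    by_cases hpre : pat.isPrefixOf (c :: t) = true
    · simp only [hpre, if_true] at h
      cases u with
      | nil => exact List.nil_prefix
      | cons a u' =>
        rw [List.cons_prefix_cons] at h
        exact absurd h.1 (hu a (by simp)).2
    · rw [Bool.not_eq_true] at hpre
      simp only [hpre, Bool.false_eq_true, if_false] at h
      cases u with
      | nil => exact List.nil_prefix
      | cons a u' =>
        rw [List.cons_prefix_cons] at h ⊢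
        exact ⟨h.1, ih u' (fun x hx => hu x (by simp [hx])) h.2⟩

lemma pvRep_infix_pres (pat : List Char) (hpat : pat.head? = some 'F')
    (w : List Char) (hw : w.head? = some 'F') (hw2 : ∀ c ∈ w.drop 1, c ≠ 'F' ∧ c ≠ '_') :
    ∀ n t, t.length ≤ n → w <:+: pvRep pat t → w <:+: t := by
  obtain ⟨w', rfl⟩ : ∃ w', w = 'F' :: w' := by
    cases w with
    | nil => simp at hw
    | cons a w' => simp only [List.head?_cons, Option.some.injEq] at hw; exact ⟨w', by rw [hw]⟩
  simp only [List.drop_one, List.tail_cons] at hw2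
  intro n
  induction n with
  | zero =>
    intro t ht h
    have : t = [] := List.eq_nil_of_length_eq_zero (by omega)
    subst this
    rw [pvRep_nil] at h
    exact h
  | succ n ih =>
    intro t ht h
    cases t with
    | nil => rw [pvRep_nil] at h; exact h
    | cons c t =>
      rw [pvRep_cons] at h
      by_cases hpre : pat.isPrefixOf (c :: t) = true
      · simp only [hpre, if_true] at h
        rcases List.infix_cons_iff.mp h with hp | hi
        · rw [List.cons_prefix_cons] at hp
          exact absurd hp.1.symm (by decide)
        · have h1 := ih (t.drop (pat.length - 1))
            (by simp only [List.length_drop]; simp only [List.length_cons] at ht; omega) hi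
          have h2 : ('F' :: w') <:+: t := h1.trans (List.drop_suffix _ _).isInfix
          exact List.infix_cons_iff.mpr (Or.inr h2)
      · rw [Bool.not_eq_true] at hpre
        simp only [hpre, Bool.false_eq_true, if_false] at h
        rcases List.infix_cons_iff.mp h with hp | hi
        · rw [List.cons_prefix_cons] at hp
          have := pvRep_prefix_pres pat hpat t w' hw2 hp.2
          exact (List.cons_prefix_cons.mpr ⟨hp.1, this⟩).isInfix
        · exact List.infix_cons_iff.mpr (Or.inr (ih t (by simp at ht; omega) hi))

lemma pvRep_id (pat : List Char) : ∀ t, ¬ pat <:+: t → pvRep pat t = t := by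
  intro t
  induction t with
  | nil => intro _; exact pvRep_nil pat
  | cons c t ih =>
    intro h
    rw [pvRep_cons]
    by_cases hpre : pat.isPrefixOf (c :: t) = true
    · exact absurd (List.isPrefixOf_iff_prefix.mp hpre).isInfix h
    · rw [Bool.not_eq_true] at hpre
      simp only [hpre, Bool.false_eq_true, if_false]
      rw [ih (fun hi => h (List.infix_cons_iff.mpr (Or.inr hi)))]

lemma pvRep_self (pat0 t : List Char) (h : pvGood pat0 = true) :
    pvRep pat0 (pat0 ++ t) = '_' :: pvRep pat0 t := by
  obtain ⟨h9, hh, -⟩ := pvGood_elim pat0 h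
  cases pat0 with
  | nil => simp at h9
  | cons a q =>
    rw [List.cons_append, pvRep_cons]
    have hpre : (a :: q).isPrefixOf (a :: (q ++ t)) = true :=
      List.isPrefixOf_iff_prefix.mpr (by
        rw [← List.cons_append]
        exact List.prefix_append (a :: q) t)
    rw [if_pos hpre]
    have hq8 : (a :: q).length - 1 = q.length := by simp
    rw [hq8, List.drop_left]

lemma pvRep_prepend (pat pat0 t : List Char) (hp : pvGood pat = true)
    (h0 : pvGood pat0 = true) (hne : pat ≠ pat0) :
    pvRep pat (pat0 ++ t) = pat0 ++ pvRep pat t := by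
  obtain ⟨hp9, hph, -⟩ := pvGood_elim pat hp
  obtain ⟨h09, h0h, h0tail⟩ := pvGood_elim pat0 h0
  have hnpre : ¬ pat.isPrefixOf (pat0 ++ t) = true := by
    intro hpre
    have h1 := List.prefix_iff_eq_take.mp (List.isPrefixOf_iff_prefix.mp hpre)
    have h2 := List.prefix_iff_eq_take.mp (List.prefix_append pat0 t)
    rw [hp9] at h1
    rw [h09] at h2
    exact hne (h1.trans h2.symm)
  cases pat0 with
  | nil => simp at h09
  | cons a q =>
    simp only [List.head?_cons, Option.some.injEq] at h0h
    subst h0h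
    rw [List.cons_append, pvRep_cons]
    rw [List.cons_append] at hnpre
    rw [if_neg hnpre]
    rw [pvRep_skip pat hph q t (fun x hx => (h0tail x (by simpa using hx)).1)]
    simp

lemma pvFold_nil (L : List (List Char)) : pvFold [] L = [] := by
  induction L with
  | nil => rfl
  | cons p L ih => simpa [pvFold, pvRep_nil] using ih

lemma pvFold_underscore (L : List (List Char)) (hL : ∀ p ∈ L, pvGood p = true) :
    ∀ x, pvFold ('_' :: x) L = '_' :: pvFold x L := by
  induction L with
  | nil => intro x; rfl
  | cons p L ih =>
    intro x
    have hph := (pvGood_elim p (hL p (by simp))).2.1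
    simp only [pvFold, List.foldl_cons]
    rw [pvRep_cons_ne p hph '_' (by decide) x]
    exact ih (fun q hq => hL q (by simp [hq])) (pvRep p x)

lemma pvFold_prepend (pat0 : List Char) (h0 : pvGood pat0 = true) :
    ∀ (L : List (List Char)), (∀ p ∈ L, pvGood p = true) → ∀ t,
      pvFold (pat0 ++ t) L =
        if pat0 ∈ L then '_' :: pvFold t L else pat0 ++ pvFold t L := by
  intro L
  induction L with
  | nil => intro _ t; simp [pvFold]
  | cons p L ih =>
    intro hL t
    simp only [pvFold, List.foldl_cons]
    by_cases hpp : p = pat0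
    · subst hpp
      rw [pvRep_self p t h0]
      have := pvFold_underscore L (fun q hq => hL q (by simp [hq])) (pvRep p t)
      simp only [pvFold] at this
      rw [this]
      simp
    · rw [pvRep_prepend p pat0 t (hL p (by simp)) h0 hpp]
      have := ih (fun q hq => hL q (by simp [hq])) (pvRep p t)
      simp only [pvFold] at this
      rw [this]
      have hne0 : ¬ pat0 = p := fun h => hpp h.symm
      by_cases hm : pat0 ∈ L <;> simp [hm, hne0]

lemma pvFold_nomatch (c : Char) :
    ∀ (L : List (List Char)), (∀ p ∈ L, pvGood p = true) → ∀ t,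
      (∀ p ∈ L, ¬ p <+: (c :: t)) → pvFold (c :: t) L = c :: pvFold t L := by
  intro L
  induction L with
  | nil => intro _ t _; rfl
  | cons p L ih =>
    intro hL t hc
    obtain ⟨hp9, hph, hptail⟩ := pvGood_elim p (hL p (by simp))
    have hnpre : ¬ p.isPrefixOf (c :: t) = true := fun hpre =>
      hc p (by simp) (List.isPrefixOf_iff_prefix.mp hpre)
    simp only [pvFold, List.foldl_cons]
    rw [pvRep_cons, if_neg hnpre]
    have hc' : ∀ q ∈ L, ¬ q <+: (c :: pvRep p t) := by
      intro q hq hqpre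
      obtain ⟨hq9, hqh, hqtail⟩ := pvGood_elim q (hL q (by simp [hq]))
      obtain ⟨w', rfl⟩ : ∃ w', q = 'F' :: w' := by
        cases q with
        | nil => simp at hqh
        | cons b w' =>
          simp only [List.head?_cons, Option.some.injEq] at hqh
          exact ⟨w', by rw [hqh]⟩
      rw [List.cons_prefix_cons] at hqpre
      have := pvRep_prefix_pres p hph t w'
        (fun x hx => hqtail x (by simpa using hx)) hqpre.2
      exact hc ('F' :: w') (by simp [hq]) (List.cons_prefix_cons.mpr ⟨hqpre.1, this⟩)
    have := ih (fun q hq => hL q (by simp [hq])) (pvRep p t) hc'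
    simp only [pvFold] at this
    rw [this]

lemma pvContains_iff (u : List Char) :
    FBX_SPECIAL.contains (String.ofList u) = true ↔ u ∈ pvCodes := by
  rw [PySem.Dict.contains_eq_decide_mem_keys]
  have hk : FBX_SPECIAL.keys = pvKeys := by decide
  rw [hk, decide_eq_true_eq]
  unfold pvCodes
  rw [List.mem_map]
  constructor
  · intro h
    exact ⟨String.ofList u, h, by simp [String.toList_ofList]⟩
  · rintro ⟨k, hk2, rfl⟩
    simpa [String.ofList_toList] using hk2

lemma pvNoNilCode : ∀ p ∈ pvCodes, p ≠ [] := by decide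

lemma pvMain : ∀ n (s : List Char), s.length ≤ n →
    pvFold s pvCodes = (fbxasc_scan s).1 ∧
      ((fbxasc_scan s).2 = true ↔ ∃ p ∈ pvCodes, p <:+: s) := by
  intro n
  induction n with
  | zero =>
    intro s hl
    have : s = [] := List.eq_nil_of_length_eq_zero (by omega)
    subst this
    refine ⟨by rw [fbxasc_scan]; exact pvFold_nil _, ?_⟩
    rw [fbxasc_scan]
    simp only [Bool.false_eq_true, false_iff]
    rintro ⟨p, hp, hinf⟩
    exact pvNoNilCode p hp (List.eq_nil_of_infix_nil hinf)
  | succ n ih =>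
    intro s hl
    cases s with
    | nil =>
      refine ⟨by rw [fbxasc_scan]; exact pvFold_nil _, ?_⟩
      rw [fbxasc_scan]
      simp only [Bool.false_eq_true, false_iff]
      rintro ⟨p, hp, hinf⟩
      exact pvNoNilCode p hp (List.eq_nil_of_infix_nil hinf)
    | cons c t =>
      rw [fbxasc_scan]
      by_cases hC : FBX_SPECIAL.contains (String.ofList (List.take 9 (c :: t))) = true
      · have hmem : List.take 9 (c :: t) ∈ pvCodes := (pvContains_iff _).mp hC
        have h9 : (List.take 9 (c :: t)).length = 9 := (pvGood_elim _ (pvCodes_good _ hmem)).1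
        have hsplit : List.take 9 (c :: t) ++ List.drop 9 (c :: t) = c :: t :=
          List.take_append_drop 9 (c :: t)
        have hdrop : List.drop 9 (c :: t) = List.drop 8 t := rfl
        have hlen8 : (List.drop 8 t).length ≤ n := by
          simp only [List.length_drop]
          simp only [List.length_cons] at hl
          omega
        have hrec := ih (List.drop 8 t) hlen8
        constructor
        · have hpre := pvFold_prepend (List.take 9 (c :: t)) (pvCodes_good _ hmem)
            pvCodes pvCodes_good (List.drop 9 (c :: t))
          rw [if_pos hmem] at hpre
          rw [if_pos hC]
          calc pvFold (c :: t) pvCodes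
              = pvFold (List.take 9 (c :: t) ++ List.drop 9 (c :: t)) pvCodes := by rw [hsplit]
            _ = '_' :: pvFold (List.drop 9 (c :: t)) pvCodes := hpre
            _ = '_' :: (fbxasc_scan (List.drop 8 t)).1 := by rw [hdrop, hrec.1]
        · rw [if_pos hC]
          simp only [true_iff]
          exact ⟨List.take 9 (c :: t), hmem, (List.take_prefix 9 (c :: t)).isInfix⟩
      · have hnp : ∀ p ∈ pvCodes, ¬ p <+: (c :: t) := by
          intro p hp hpre
          have h9 := (pvGood_elim p (pvCodes_good p hp)).1
          have hpt : p = List.take 9 (c :: t) := by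
            rw [List.prefix_iff_eq_take] at hpre
            rwa [h9] at hpre
          exact hC (by rw [← hpt]; exact (pvContains_iff p).mpr hp)
        have hrec := ih t (by simp only [List.length_cons] at hl; omega)
        rw [if_neg hC]
        constructor
        · rw [pvFold_nomatch c pvCodes pvCodes_good t hnp, hrec.1]
        · rw [hrec.2]
          constructor
          · rintro ⟨p, hp, hinf⟩
            exact ⟨p, hp, List.infix_cons_iff.mpr (Or.inr hinf)⟩
          · rintro ⟨p, hp, hinf⟩
            rcases List.infix_cons_iff.mp hinf with hpre | hinf'
            · exact absurd hpre (hnp p hp)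
            · exact ⟨p, hp, hinf'⟩

lemma pvGet_eq (name : String) :
    get_fbxasc name = pvKeys.filter (fun k => PySem.Str.isIn k name) := by
  unfold get_fbxasc
  rw [PySem.List.foldl_append_if (fun kv => PySem.Str.isIn kv.1 name) Prod.fst
    FBX_SPECIAL.items []]
  have hkeys : pvKeys = FBX_SPECIAL.items.map Prod.fst := by decide
  rw [hkeys, List.filter_map]
  simp only [List.nil_append]
  rfl

lemma pvFold_filter (P : List Char → Bool) :
    ∀ (L : List (List Char)), (∀ p ∈ L, pvGood p = true) → ∀ s,
      (∀ p ∈ L, P p = false → ¬ p <:+: s) →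
      pvFold s (L.filter P) = pvFold s L := by
  intro L
  induction L with
  | nil => intro _ s _; rfl
  | cons p L ih =>
    intro hL s hs
    obtain ⟨hp9, hph, hptail⟩ := pvGood_elim p (hL p (by simp))
    by_cases hP : P p = true
    · rw [List.filter_cons_of_pos hP]
      simp only [pvFold, List.foldl_cons]
      have hs' : ∀ q ∈ L, P q = false → ¬ q <:+: pvRep p s := by
        intro q hq hqP hinf
        obtain ⟨hq9, hqh, hqtail⟩ := pvGood_elim q (hL q (by simp [hq]))
        exact hs q (by simp [hq]) hqP
          (pvRep_infix_pres p hph q hqh hqtail s.length s le_rfl hinf)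
      exact ih (fun q hq => hL q (by simp [hq])) (pvRep p s) hs'
    · rw [List.filter_cons_of_neg (by simp [hP])]
      simp only [pvFold, List.foldl_cons]
      rw [pvRep_id p s (hs p (by simp) (by simpa using hP))]
      exact ih (fun q hq => hL q (by simp [hq])) s
        (fun q hq hqP => hs q (by simp [hq]) hqP)

lemma pvFoldStr_toList : ∀ (l : List String) (a : String), (∀ k ∈ l, k.toList ≠ []) →
    (l.foldl (fun s k => PySem.Str.replace s k "_") a).toList =
      pvFold a.toList (l.map String.toList) := by
  intro l
  induction l with
  | nil => intro a _; rfl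
  | cons k l ih =>
    intro a hl
    simp only [List.foldl_cons, List.map_cons]
    rw [ih (PySem.Str.replace a k "_") (fun q hq => hl q (by simp [hq]))]
    have hrep : (PySem.Str.replace a k "_").toList = pvRep k.toList a.toList := by
      rw [PySem.Str.toList_replace]
      exact pvReplace_eq a.toList k.toList (hl k (by simp))
    rw [hrep]
    simp only [pvFold, List.foldl_cons]

-- ===== VERDICT (by name: the statement is the Claim_ definition above) =====
lemma pvKeys_nonnil : ∀ k ∈ pvKeys, k.toList ≠ [] := by decide

theorem fbxasc_patch_spec : Claim_equal_fbxasc_patch := by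
  intro name _
  show fbxasc_patch name = fbxasc_patch_alt name
  have hget := pvGet_eq name
  have hmain := pvMain name.toList.length name.toList le_rfl
  have hbadmap : (get_fbxasc name).map String.toList
      = pvCodes.filter (fun u => PySem.Chars.isIn u name.toList) := by
    rw [hget]
    calc (pvKeys.filter (fun k => PySem.Str.isIn k name)).map String.toList
        = (pvKeys.filter ((fun u => PySem.Chars.isIn u name.toList) ∘ String.toList)).map
            String.toList := by congr 1
      _ = (pvKeys.map String.toList).filter (fun u => PySem.Chars.isIn u name.toList) :=
          List.filter_map.symm
      _ = pvCodes.filter (fun u => PySem.Chars.isIn u name.toList) := rfl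
  have hempty : (get_fbxasc name = []) ↔ ¬ ∃ p ∈ pvCodes, p <:+: name.toList := by
    rw [hget, List.filter_eq_nil_iff]
    constructor
    · rintro h ⟨p, hp, hinf⟩
      obtain ⟨k, hk, rfl⟩ := List.mem_map.mp hp
      exact h k hk (by simpa using (PySem.Str.isIn_iff_infix k name).mpr hinf)
    · intro h k hk hkin
      exact h ⟨k.toList, List.mem_map_of_mem hk, (PySem.Str.isIn_iff_infix k name).mp hkin⟩
  by_cases hb : get_fbxasc name = []
  · have hfalse : (fbxasc_scan name.toList).2 = false := by
      cases h : (fbxasc_scan name.toList).2 with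
      | false => rfl
      | true => exact absurd (hmain.2.mp h) (hempty.mp hb)
    simp [fbxasc_patch, fbxasc_patch_alt, hb, hfalse, PySem.List.len]
  · have hex : ∃ p ∈ pvCodes, p <:+: name.toList := by
      by_contra hno
      exact hb (hempty.mpr hno)
    have htrue : (fbxasc_scan name.toList).2 = true := hmain.2.mpr hex
    have hlen : PySem.List.len (get_fbxasc name) > 0 := by
      have := List.length_pos_iff.mpr hb
      simp only [PySem.List.len]
      exact_mod_cast this
    have hnonnil : ∀ k ∈ get_fbxasc name, k.toList ≠ [] := by
      intro k hk
      rw [hget] at hk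
      exact pvKeys_nonnil k (List.mem_of_mem_filter hk)
    have hrange := PySem.List.foldl_pyRange_pyGetD (get_fbxasc name) ""
      (fun obj k => PySem.Str.replace obj k "_") name (a := 0) le_rfl
    have hfilter := pvFold_filter (fun u => PySem.Chars.isIn u name.toList) pvCodes
      pvCodes_good name.toList
      (fun p _ hP => (PySem.Chars.isIn_eq_false_iff p name.toList).mp hP)
    simp only [fbxasc_patch, fbxasc_patch_alt, if_pos hlen, if_pos htrue]
    congr 1
    apply String.toList_inj.mp
    rw [hrange]
    simp only [Int.toNat_zero, List.drop_zero]
    rw [pvFoldStr_toList (get_fbxasc name) name hnonnil, hbadmap, hfilter, hmain.1,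
      String.toList_ofList]
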